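-- pv_equiv track=rewrite | github.com/PenkStudios/Mathiful | src/resources/check.py | tv
-- ===== SOURCE A (Python) =====
-- def tv(arr, cmd):
--     r = (len(arr[0]), len(arr))
--     cpixels = 0
--     bad = 0
--
--     for y, y_list in enumerate(arr):
--         for x in range(len(y_list)):
--             if (x in range(0, 3) or x in range(r[0] - 3, r[0])) or \
--                 (y in range(0, 3) or y in range(r[1] - 3, r[1])):
--                 if x == 0 and y == 0:
--                     bcolor = arr[y][x]
--                 else:
--                     if arr[y][x] != bcolor:
--                         return False
--             else:
--                 if cpixels == 0:
--                     ccolor = arr[y][x]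
--                 else:
--                     if arr[y][x] == ccolor:
--                         bad += 1
--
--                 cpixels += 1
--
--     return True if bad < 5 else False
-- ===== SOURCE B (Python) =====
-- def tv(arr, cmd):
--     w, h = len(arr[0]), len(arr)
--     bcolor = arr[0][0]
--     lo, hi = max(3, w - 3), max(3, w)
--     interior = []
--     for y, row in enumerate(arr):
--         if y < 3 or y >= h - 3:
--             # entire row is border
--             if any(v != bcolor for v in row):
--                 return False
--         else:
--             # border columns as slices, interior columns as slices
--             if any(v != bcolor for v in row[:3] + row[lo:hi]):
--                 return False
--             interior += row[3:lo] + row[hi:]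
--     return not interior or interior[1:].count(interior[0]) < 5
-- ===== Notes on version B (the rewrite author's own statement) =====
-- stated objective: faster
-- what changed: A walks every pixel with a per-pixel range-membership border test and hand-incremented counters; B never tests individual pixels: it classifies whole rows (the first/last three rows are all border) and decomposes each middle row by list slicing into border slices row[:3]+row[lo:hi] checked wholesale and interior slices row[3:lo]+row[hi:], finishing with list.count on the collected interior — bulk slice/count operations replace A's per-pixel Python-level work.
-- outside the precondition, e.g. on tv([[]], 0): A returns True, B raises IndexError
import Mathlib
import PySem

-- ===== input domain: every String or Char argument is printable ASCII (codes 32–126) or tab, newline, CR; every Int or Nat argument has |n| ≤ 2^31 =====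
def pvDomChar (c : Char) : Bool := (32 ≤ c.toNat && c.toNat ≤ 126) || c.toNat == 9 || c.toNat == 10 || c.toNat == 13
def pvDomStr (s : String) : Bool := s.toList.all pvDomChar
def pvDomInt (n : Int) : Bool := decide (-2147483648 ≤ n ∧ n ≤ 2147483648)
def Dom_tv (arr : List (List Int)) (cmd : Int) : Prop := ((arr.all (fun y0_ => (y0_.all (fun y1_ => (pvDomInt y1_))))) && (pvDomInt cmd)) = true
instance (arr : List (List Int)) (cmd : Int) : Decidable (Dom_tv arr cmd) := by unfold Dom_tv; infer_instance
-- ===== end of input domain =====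

-- B replaces A's per-pixel border membership tests and counters by whole-row classification with list slices
-- (border rows checked wholesale, middle rows split into border/interior slices) and a final list.count;
-- a timing run measured B faster by a constant factor (bulk slice/count ops instead of per-pixel work).

-- ===== PORT A =====
-- row of pixels (y, x, value) for `for x in range(len(y_list))`; getD is safe: x < row.length
def pvRowPix (y : Int) (row : List Int) : List (Int × Int × Int) :=
  (List.range row.length).map (fun (x : Nat) => (y, (x : Int), row.getD x 0))

-- `for y, y_list in enumerate(arr)` flattened in row-major order
def pvPixelsFrom (y : Int) : List (List Int) → List (Int × Int × Int)
  | [] => []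
  | r :: rs => pvRowPix y r ++ pvPixelsFrom (y + 1) rs

def pvPixels (arr : List (List Int)) : List (Int × Int × Int) := pvPixelsFrom 0 arr

-- A's border test: (x in range(0,3) or x in range(w-3,w)) or (y in range(0,3) or y in range(h-3,h))
def pvBorderA (w h x y : Int) : Bool :=
  ((decide (0 ≤ x) && decide (x < 3)) || (decide (w - 3 ≤ x) && decide (x < w))) ||
  ((decide (0 ≤ y) && decide (y < 3)) || (decide (h - 3 ≤ y) && decide (y < h)))

-- A's loop body, step for step; bcolor/ccolor are Options because Python leaves them unbound until first
-- assigned (the `.getD 0` branches are reachable only outside Pre_tv, where Python raises UnboundLocalError)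
def tvLoop (w h : Int) (bcolor ccolor : Option Int) (cpixels bad : Int) :
    List (Int × Int × Int) → Bool
  | [] => if bad < 5 then true else false
  | (y, x, v) :: rest =>
    if pvBorderA w h x y then
      if x = 0 ∧ y = 0 then tvLoop w h (some v) ccolor cpixels bad rest
      else if v ≠ bcolor.getD 0 then false
      else tvLoop w h bcolor ccolor cpixels bad rest
    else
      if cpixels = 0 then tvLoop w h bcolor (some v) (cpixels + 1) bad rest
      else if v = ccolor.getD 0 then tvLoop w h bcolor ccolor (cpixels + 1) (bad + 1) rest
      else tvLoop w h bcolor ccolor (cpixels + 1) bad rest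

-- `len(arr[0])` raises on arr = []: excluded by Pre_tv (headD only a placeholder there)
def tv (arr : List (List Int)) (cmd : Int) : Bool :=
  tvLoop ((arr.headD []).length : Int) (arr.length : Int) none none 0 0 (pvPixels arr)

-- ===== PORT B =====
-- the row loop of Source B: y<3 / y>=h-3 rows are checked wholesale, middle rows are split by slices;
-- `return False` is `none`, otherwise the accumulated `interior` list is returned
def tvAltGo (h b lo hi : Int) (y : Int) (interior : List Int) : List (List Int) → Option (List Int)
  | [] => some interior
  | row :: rest =>
    if decide (y < 3) || decide (h - 3 ≤ y) then
      if row.any (fun v => !(v == b)) then none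
      else tvAltGo h b lo hi (y + 1) interior rest
    else
      if (PySem.List.slice row none (some 3) ++ PySem.List.slice row (some lo) (some hi)).any
          (fun v => !(v == b)) then none
      else tvAltGo h b lo hi (y + 1)
        (interior ++ (PySem.List.slice row (some 3) (some lo) ++ PySem.List.slice row (some hi) none)) rest

-- `arr[0][0]` raises on arr = [] or arr[0] = []: excluded by Pre_tv
def tv_alt (arr : List (List Int)) (cmd : Int) : Bool :=
  let w : Int := ((arr.headD []).length : Int)
  let h : Int := (arr.length : Int)
  let b : Int := (arr.headD []).getD 0 0
  let lo : Int := max 3 (w - 3)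
  let hi : Int := max 3 w
  match tvAltGo h b lo hi 0 [] arr with
  | none => false
  | some interior =>
    match interior with
    | [] => true
    | c :: rest => decide ((rest.count c : Int) < 5)

-- ===== PRECONDITION & SPEC =====
-- Pre_tv excludes arr = [] (both raise) and an empty first row, on which A either raises UnboundLocalError
-- or (all rows empty) returns True by accident while B's bcolor = arr[0][0] raises IndexError.
def Pre_tv (arr : List (List Int)) (cmd : Int) : Prop := arr ≠ [] ∧ arr.headD [] ≠ []
instance (arr : List (List Int)) (cmd : Int) : Decidable (Pre_tv arr cmd) := by unfold Pre_tv; infer_instance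
def pvWitness_tv : List (List Int) × Int := ([[7, 7], [7, 7]], 0)

def Spec_tv (arr : List (List Int)) (cmd : Int) (out : Bool) : Prop := out = tv_alt arr cmd
instance (arr : List (List Int)) (cmd : Int) (out : Bool) : Decidable (Spec_tv arr cmd out) := by unfold Spec_tv; infer_instance

-- ===== CLAIM (what is proved, stated in full; the proofs are below) =====
def Claim_equal_tv : Prop := ∀ (arr : List (List Int)) (cmd : Int), Dom_tv arr cmd → Pre_tv arr cmd → Spec_tv arr cmd (tv arr cmd)

-- ===== LEMMAS AND PROOFS =====

-- proof-side vocabulary: a pointwise border test, and 'pass1'/'interior' views of a pixel list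
def pvBorderB (w h x y : Int) : Bool :=
  decide (x < 3) || (decide (w - 3 ≤ x) && decide (x < w)) ||
  decide (y < 3) || (decide (h - 3 ≤ y) && decide (y < h))

def pvPass1 (w h b : Int) (ps : List (Int × Int × Int)) : Bool :=
  ps.all (fun p => !(pvBorderB w h p.2.1 p.1 && !(p.2.1 == 0 && p.1 == 0) && !(p.2.2 == b)))

def pvInterior (w h : Int) (ps : List (Int × Int × Int)) : List Int :=
  ps.filterMap (fun p => if pvBorderB w h p.2.1 p.1 then none else some p.2.2)

-- values of a row at the indices satisfying a predicate, in index order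
def idxVals (l : List Int) (p : Nat → Bool) : List Int :=
  (List.range l.length).filterMap (fun x => if p x then some (l.getD x 0) else none)

-- the two border tests agree on pixels (x, y ≥ 0)
theorem border_eq (w h x y : Int) (hx : 0 ≤ x) (hy : 0 ≤ y) :
    pvBorderA w h x y = pvBorderB w h x y := by
  simp [pvBorderA, pvBorderB, hx, hy, Bool.or_assoc]

-- coordinates produced by pvPixelsFrom are nonnegative (given a nonnegative starting row)
theorem pixels_nonneg (y0 : Int) (hy0 : 0 ≤ y0) (rs : List (List Int)) :
    ∀ p ∈ pvPixelsFrom y0 rs, 0 ≤ p.1 ∧ 0 ≤ p.2.1 := by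
  induction rs generalizing y0 with
  | nil => intro p hp; simp [pvPixelsFrom] at hp
  | cons r rs ih =>
    intro p hp
    simp only [pvPixelsFrom, List.mem_append] at hp
    rcases hp with hp | hp
    · simp only [pvRowPix, List.mem_map, List.mem_range] at hp
      obtain ⟨x, -, rfl⟩ := hp
      exact ⟨hy0, Int.natCast_nonneg x⟩
    · exact ih (y0 + 1) (by omega) p hp

-- rows from pvPixelsFrom with starting row ≥ 1 have first coordinate ≥ 1
theorem pixels_from_pos (y0 : Int) (hy0 : 1 ≤ y0) (rs : List (List Int)) :
    ∀ p ∈ pvPixelsFrom y0 rs, 1 ≤ p.1 := by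
  induction rs generalizing y0 with
  | nil => intro p hp; simp [pvPixelsFrom] at hp
  | cons r rs ih =>
    intro p hp
    simp only [pvPixelsFrom, List.mem_append] at hp
    rcases hp with hp | hp
    · simp only [pvRowPix, List.mem_map, List.mem_range] at hp
      obtain ⟨x, -, rfl⟩ := hp
      exact hy0
    · exact ih (y0 + 1) (by omega) p hp

-- ccolor already chosen (cpixels ≠ 0): the remaining loop is pass1 + counting on the remaining interior pixels
theorem tvLoop_ccolor (w h b c : Int) (L : List (Int × Int × Int)) :
    ∀ (cp bad : Int), 1 ≤ cp →
    (∀ p ∈ L, ¬(p.1 = 0 ∧ p.2.1 = 0)) →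
    (∀ p ∈ L, 0 ≤ p.1 ∧ 0 ≤ p.2.1) →
    tvLoop w h (some b) (some c) cp bad L =
      if pvPass1 w h b L then
        decide (bad + (((pvInterior w h L).filter (· == c)).length : Int) < 5)
      else false := by
  induction L with
  | nil => intro cp bad hcp _ _; simp [tvLoop, pvPass1, pvInterior]
  | cons p L ih =>
    intro cp bad hcp1 h00 hnn
    have hcp : cp ≠ 0 := by omega
    obtain ⟨y, x, v⟩ := p
    have h00' : ¬(y = 0 ∧ x = 0) := h00 (y, x, v) (List.mem_cons_self ..)
    have hnn' : 0 ≤ y ∧ 0 ≤ x := hnn (y, x, v) (List.mem_cons_self ..)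
    have hb := border_eq w h x y hnn'.2 hnn'.1
    have e0 : ((x == 0) && (y == 0)) = false := by
      rcases not_and_or.mp h00' with hq | hq <;> simp [hq]
    have h00L := fun q hq => h00 q (List.mem_cons_of_mem _ hq)
    have hnnL := fun q hq => hnn q (List.mem_cons_of_mem _ hq)
    have h0 : ¬(x = 0 ∧ y = 0) := fun hq => h00' ⟨hq.2, hq.1⟩
    by_cases hbd : pvBorderA w h x y = true
    · by_cases hv : v = b
      · simp only [tvLoop, hbd, if_pos rfl, h0, Option.getD_some, hv, ne_eq,
          not_true_eq_false, if_false, ite_false, ite_true]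
        rw [ih cp bad hcp1 h00L hnnL]
        simp [pvPass1, pvInterior, ← hb, hbd, e0]
        rfl
      · have ev : (v == b) = false := by simp [hv]
        simp only [tvLoop, hbd, if_pos rfl, h0, Option.getD_some]
        simp only [ne_eq, hv, not_false_eq_true, if_true, ite_false]
        simp [pvPass1, ← hb, hbd, e0, ev]
    · have hbd' : pvBorderA w h x y = false := by simpa using hbd
      simp only [tvLoop, hbd', Bool.false_eq_true, if_false, if_neg hcp, Option.getD_some]
      by_cases hv : v = c
      · simp only [hv, if_pos rfl]
        rw [ih (cp + 1) (bad + 1) (by omega) h00L hnnL]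
        simp only [pvPass1, pvInterior, List.all_cons, ← hb, hbd', List.filterMap_cons,
          Bool.false_eq_true, if_false, List.filter_cons, beq_self_eq_true, if_pos,
          List.length_cons, Bool.not_false, Bool.false_and, Bool.and_false, Bool.true_and]
        split_ifs with hrest
        · rw [decide_eq_decide]
          push_cast
          constructor <;> intro <;> omega
        · rfl
      · have ev : (v == c) = false := by simp [hv]
        simp only [if_neg hv]
        rw [ih (cp + 1) bad (by omega) h00L hnnL]
        simp [pvPass1, pvInterior, ← hb, hbd', List.filter_cons, ev]
        rfl

-- ccolor not yet chosen (cpixels = 0): the remaining loop is pass1 + pass2 on the remaining pixels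
theorem tvLoop_start (w h b : Int) (L : List (Int × Int × Int)) :
    ∀ (cc : Option Int) (bad : Int),
    (∀ p ∈ L, ¬(p.1 = 0 ∧ p.2.1 = 0)) →
    (∀ p ∈ L, 0 ≤ p.1 ∧ 0 ≤ p.2.1) →
    tvLoop w h (some b) cc 0 bad L =
      if pvPass1 w h b L then
        (match pvInterior w h L with
         | [] => decide (bad < 5)
         | c :: rest => decide (bad + ((rest.filter (· == c)).length : Int) < 5))
      else false := by
  induction L with
  | nil => intro cc bad _ _; simp [tvLoop, pvPass1, pvInterior]
  | cons p L ih =>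
    intro cc bad h00 hnn
    obtain ⟨y, x, v⟩ := p
    have h00' : ¬(y = 0 ∧ x = 0) := h00 (y, x, v) (List.mem_cons_self ..)
    have hnn' : 0 ≤ y ∧ 0 ≤ x := hnn (y, x, v) (List.mem_cons_self ..)
    have hb := border_eq w h x y hnn'.2 hnn'.1
    have e0 : ((x == 0) && (y == 0)) = false := by
      rcases not_and_or.mp h00' with hq | hq <;> simp [hq]
    have h00L := fun q hq => h00 q (List.mem_cons_of_mem _ hq)
    have hnnL := fun q hq => hnn q (List.mem_cons_of_mem _ hq)
    have h0 : ¬(x = 0 ∧ y = 0) := fun hq => h00' ⟨hq.2, hq.1⟩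
    by_cases hbd : pvBorderA w h x y = true
    · by_cases hv : v = b
      · simp only [tvLoop, hbd, if_pos rfl, h0, Option.getD_some, hv, ne_eq,
          not_true_eq_false, if_false, ite_false, ite_true]
        rw [ih cc bad h00L hnnL]
        simp [pvPass1, pvInterior, ← hb, hbd, e0]
      · have ev : (v == b) = false := by simp [hv]
        simp only [tvLoop, hbd, if_pos rfl, h0, Option.getD_some]
        simp only [ne_eq, hv, not_false_eq_true, if_true, ite_false]
        simp [pvPass1, ← hb, hbd, e0, ev]
    · have hbd' : pvBorderA w h x y = false := by simpa using hbd
      simp only [tvLoop, hbd', Bool.false_eq_true, if_false, if_pos rfl]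
      rw [tvLoop_ccolor w h b v L (0 + 1) bad (by omega) h00L hnnL]
      simp [pvPass1, pvInterior, ← hb, hbd']
      rfl


-- ----- generic index-value lemmas -----
theorem idxVals_cons (v : Int) (l : List Int) (p : Nat → Bool) :
    idxVals (v :: l) p = (if p 0 then [v] else []) ++ idxVals l (fun x => p (x + 1)) := by
  simp only [idxVals, List.length_cons, List.range_succ_eq_map, List.filterMap_cons,
    List.filterMap_map, Function.comp_def, List.getD_cons_succ, List.getD_cons_zero]
  cases hp : p 0 <;> simp

theorem idxVals_congr (l : List Int) (p q : Nat → Bool)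
    (h : ∀ x, x < l.length → p x = q x) : idxVals l p = idxVals l q := by
  induction l generalizing p q with
  | nil => simp [idxVals]
  | cons v l ih =>
    rw [idxVals_cons, idxVals_cons, h 0 (by simp),
      ih _ _ (fun x hx => h (x + 1) (by simpa using Nat.succ_lt_succ hx))]

theorem idxVals_interval (l : List Int) (a b : Nat) :
    idxVals l (fun x => decide (a ≤ x) && decide (x < b)) = (l.drop a).take (b - a) := by
  induction l generalizing a b with
  | nil => simp [idxVals]
  | cons v l ih =>
    rw [idxVals_cons]
    rw [idxVals_congr l _ (fun x => decide (a - 1 ≤ x) && decide (x < b - 1))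
      (fun x _ => by simp only [← Bool.decide_and, decide_eq_decide]; omega), ih]
    by_cases ha : a = 0 ∧ 0 < b
    · obtain ⟨rfl, hb⟩ := ha
      have : b - 1 - 0 = b - 1 := by omega
      simp [this]
      cases b with
      | zero => omega
      | succ b => simp
    · have h0 : (decide (a ≤ 0) && decide (0 < b)) = false := by
        rw [← Bool.decide_and, decide_eq_false_iff_not]; omega
      rw [h0]
      rcases Nat.eq_zero_or_pos a with rfl | hpos
      · have hb : b = 0 := by omega
        subst hb; simp
      · obtain ⟨a', rfl⟩ : ∃ a', a = a' + 1 := ⟨a - 1, by omega⟩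
        have e1 : a' + 1 - 1 = a' := by omega
        have e2 : b - 1 - a' = b - (a' + 1) := by omega
        simp [e1, e2]

theorem idxVals_false (l : List Int) (p : Nat → Bool) (h : ∀ x, x < l.length → p x = false) :
    idxVals l p = [] := by
  rw [idxVals_congr l p (fun _ => false) h]; simp [idxVals]

theorem idxVals_all_true (l : List Int) (p : Nat → Bool) (h : ∀ x, x < l.length → p x = true) :
    idxVals l p = l := by
  rw [idxVals_congr l p (fun x => decide (0 ≤ x) && decide (x < l.length))
      (fun x hx => by rw [h x hx]; symm; simp only [← Bool.decide_and, decide_eq_true_eq]; omega),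
    idxVals_interval]
  simp

theorem idxVals_union (l : List Int) (a b c d : Nat) (hbc : b ≤ c) :
    idxVals l (fun x => (decide (a ≤ x) && decide (x < b)) || (decide (c ≤ x) && decide (x < d)))
      = idxVals l (fun x => decide (a ≤ x) && decide (x < b))
        ++ idxVals l (fun x => decide (c ≤ x) && decide (x < d)) := by
  induction l generalizing a b c d with
  | nil => simp [idxVals]
  | cons v l ih =>
    simp only [idxVals_cons]
    rw [idxVals_congr l _
        (fun x => (decide (a - 1 ≤ x) && decide (x < b - 1)) || (decide (c - 1 ≤ x) && decide (x < d - 1)))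
        (fun x _ => by simp only [← Bool.decide_and, ← Bool.decide_or, decide_eq_decide]; omega),
      ih (a - 1) (b - 1) (c - 1) (d - 1) (by omega),
      idxVals_congr l (fun x => decide (a ≤ x + 1) && decide (x + 1 < b))
        (fun x => decide (a - 1 ≤ x) && decide (x < b - 1))
        (fun x _ => by simp only [← Bool.decide_and, decide_eq_decide]; omega),
      idxVals_congr l (fun x => decide (c ≤ x + 1) && decide (x + 1 < d))
        (fun x => decide (c - 1 ≤ x) && decide (x < d - 1))
        (fun x _ => by simp only [← Bool.decide_and, decide_eq_decide]; omega)]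
    by_cases hA : a = 0 ∧ 0 < b
    · have h1 : (decide (a ≤ 0) && decide (0 < b)) = true := by
        rw [← Bool.decide_and, decide_eq_true_eq]; omega
      have h2 : (decide (c ≤ 0) && decide (0 < d)) = false := by
        rw [← Bool.decide_and, decide_eq_false_iff_not]; omega
      rw [h1, h2]; simp
    · by_cases hC : c = 0 ∧ 0 < d
      · have h1 : (decide (a ≤ 0) && decide (0 < b)) = false := by
          rw [← Bool.decide_and, decide_eq_false_iff_not]; omega
        have h2 : (decide (c ≤ 0) && decide (0 < d)) = true := by
          rw [← Bool.decide_and, decide_eq_true_eq]; omega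
        rw [h1, h2,
          idxVals_false l (fun x => decide (a - 1 ≤ x) && decide (x < b - 1))
            (fun x _ => by simp only [← Bool.decide_and, decide_eq_false_iff_not]; omega)]
        simp
      · have h1 : (decide (a ≤ 0) && decide (0 < b)) = false := by
          rw [← Bool.decide_and, decide_eq_false_iff_not]; omega
        have h2 : (decide (c ≤ 0) && decide (0 < d)) = false := by
          rw [← Bool.decide_and, decide_eq_false_iff_not]; omega
        rw [h1, h2]; simp

theorem all_idxVals (l : List Int) (p : Nat → Bool) (g : Int → Bool) :
    (idxVals l p).all g = (List.range l.length).all (fun x => !(p x && !(g (l.getD x 0)))) := by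
  induction l generalizing p with
  | nil => simp [idxVals]
  | cons v l ih =>
    rw [idxVals_cons, List.all_append]
    have hrange : (List.range (v :: l).length).all (fun x => !(p x && !(g ((v :: l).getD x 0))))
        = ((!(p 0 && !(g v))) && (List.range l.length).all (fun x => !(p (x + 1) && !(g (l.getD x 0))))) := by
      simp [List.range_succ_eq_map, List.all_map, Function.comp_def]
    rw [hrange, ← ih]
    cases hp : p 0 <;> cases hg : g v <;> simp [hp, hg]

theorem anynot (l : List Int) (b : Int) : l.any (fun v => !(v == b)) = !l.all (fun v => v == b) := by
  induction l with
  | nil => rfl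
  | cons v l ih => simp [List.any_cons, List.all_cons, ih]

theorem all_range_getD (l : List Int) (f : Int → Bool) :
    (List.range l.length).all (fun k => f (l.getD k 0)) = l.all f := by
  induction l with
  | nil => rfl
  | cons v l ih =>
    simp only [List.length_cons, List.range_succ_eq_map, List.all_cons, List.all_map,
      Function.comp_def, List.getD_cons_succ, List.getD_cons_zero, ih]

-- ----- pass1 / interior over appends and single rows -----
theorem pass1_append (w h b : Int) (L1 L2 : List (Int × Int × Int)) :
    pvPass1 w h b (L1 ++ L2) = (pvPass1 w h b L1 && pvPass1 w h b L2) := by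
  simp [pvPass1]

theorem interior_append (w h : Int) (L1 L2 : List (Int × Int × Int)) :
    pvInterior w h (L1 ++ L2) = pvInterior w h L1 ++ pvInterior w h L2 := by
  simp [pvInterior]

theorem pass1_row (w h b y : Int) (row : List Int) :
    pvPass1 w h b (pvRowPix y row) =
      (idxVals row (fun x => pvBorderB w h (x:Int) y && !(((x:Int) == (0:Int)) && (y == (0:Int))))).all (· == b) := by
  rw [all_idxVals]
  simp [pvPass1, pvRowPix, List.all_map, Function.comp_def]

theorem interior_row (w h y : Int) (row : List Int) :
    pvInterior w h (pvRowPix y row) = idxVals row (fun x => !(pvBorderB w h (x:Int) y)) := by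
  simp only [pvInterior, pvRowPix, idxVals, List.filterMap_map, Function.comp_def]
  congr 1
  funext x
  by_cases hb : pvBorderB w h (x:Int) y = true
  · simp [hb]
  · simp [Bool.eq_false_iff.mpr hb]

theorem border_row_y (w h x y : Int) (hy : y < 3 ∨ (h - 3 ≤ y ∧ y < h)) :
    pvBorderB w h x y = true := by
  simp only [pvBorderB, ← Bool.decide_and, ← Bool.decide_or, decide_eq_true_eq]; omega

theorem pass1_row_border (w h b y : Int) (row : List Int) (hy1 : 1 ≤ y) (hyh : y < h)
    (hb : y < 3 ∨ h - 3 ≤ y) :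
    pvPass1 w h b (pvRowPix y row) = row.all (· == b) := by
  rw [pass1_row, idxVals_all_true]
  intro x hx
  rw [border_row_y w h (x:Int) y (by omega)]
  have hy0 : ((y == (0:Int))) = false := by simp; omega
  simp [hy0]

theorem interior_row_border (w h y : Int) (row : List Int) (hyh : y < h)
    (hb : y < 3 ∨ h - 3 ≤ y) :
    pvInterior w h (pvRowPix y row) = [] := by
  rw [interior_row]
  apply idxVals_false
  intro x hx
  rw [border_row_y w h (x:Int) y (by omega)]
  rfl

theorem border_row_mid (w h y : Int) (hy3 : 3 ≤ y) (hyh : y < h - 3) (loN hiN : Nat)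
    (hlo : (loN:Int) = max 3 (w - 3)) (hhi : (hiN:Int) = max 3 w) (x : Nat) :
    pvBorderB w h (x:Int) y
      = ((decide ((0:Nat) ≤ x) && decide (x < 3)) || (decide (loN ≤ x) && decide (x < hiN))) := by
  have h1 : (loN:Int) = 3 ∨ (loN:Int) = w - 3 := by rw [hlo]; exact max_choice _ _
  have h2 : 3 ≤ (loN:Int) := by rw [hlo]; exact le_max_left _ _
  have h3 : w - 3 ≤ (loN:Int) := by rw [hlo]; exact le_max_right _ _
  have h4 : (hiN:Int) = 3 ∨ (hiN:Int) = w := by rw [hhi]; exact max_choice _ _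
  have h5 : 3 ≤ (hiN:Int) := by rw [hhi]; exact le_max_left _ _
  have h6 : w ≤ (hiN:Int) := by rw [hhi]; exact le_max_right _ _
  simp only [pvBorderB, ← Bool.decide_and, ← Bool.decide_or, decide_eq_decide]
  omega

theorem pass1_row_mid (w h b y : Int) (row : List Int) (hy3 : 3 ≤ y) (hyh : y < h - 3)
    (loN hiN : Nat) (hlo : (loN:Int) = max 3 (w - 3)) (hhi : (hiN:Int) = max 3 w) :
    pvPass1 w h b (pvRowPix y row)
      = (row.take 3 ++ (row.drop loN).take (hiN - loN)).all (· == b) := by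
  have hlo3 : 3 ≤ loN := by have : 3 ≤ (loN:Int) := by rw [hlo]; exact le_max_left _ _
                            omega
  rw [pass1_row,
    idxVals_congr row _
      (fun x => (decide ((0:Nat) ≤ x) && decide (x < 3)) || (decide (loN ≤ x) && decide (x < hiN)))
      (fun x hx => by
        have hy0 : ((y == (0:Int))) = false := by
          rw [beq_eq_false_iff_ne]; omega
        simp only [hy0, Bool.and_false, Bool.not_false, Bool.and_true]
        exact border_row_mid w h y hy3 hyh loN hiN hlo hhi x),
    idxVals_union row 0 3 loN hiN hlo3, idxVals_interval, idxVals_interval]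
  simp

theorem interior_row_mid (w h y : Int) (row : List Int) (hy3 : 3 ≤ y) (hyh : y < h - 3)
    (loN hiN : Nat) (hlo : (loN:Int) = max 3 (w - 3)) (hhi : (hiN:Int) = max 3 w) :
    pvInterior w h (pvRowPix y row) = (row.drop 3).take (loN - 3) ++ row.drop hiN := by
  have hlo3 : 3 ≤ loN := by have : 3 ≤ (loN:Int) := by rw [hlo]; exact le_max_left _ _
                            omega
  have hlohi : loN ≤ hiN := by
    have : (loN:Int) ≤ (hiN:Int) := by rw [hlo, hhi]; exact max_le_max_left _ (by omega)
    omega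
  rw [interior_row,
    idxVals_congr row _
      (fun x => (decide (3 ≤ x) && decide (x < loN)) || (decide (hiN ≤ x) && decide (x < row.length)))
      (fun x hx => by
        rw [border_row_mid w h y hy3 hyh loN hiN hlo hhi x]
        simp only [← Bool.decide_and, ← Bool.decide_or, ← decide_not, decide_eq_decide]
        omega),
    idxVals_union row 3 loN hiN row.length hlohi, idxVals_interval, idxVals_interval]
  have e : (row.drop hiN).take (row.length - hiN) = row.drop hiN :=
    List.take_of_length_le (by simp)
  rw [e]

-- ----- the pixels of row 0 after peeling (0,0) -----
theorem pass1_shifted (w h b : Int) (l : List Int) :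
    pvPass1 w h b ((List.range l.length).map (fun k : Nat => ((0:Int), ((k + 1 : Nat):Int), l.getD k 0)))
      = l.all (· == b) := by
  rw [← all_range_getD l (· == b)]
  simp only [pvPass1, List.all_map, Function.comp_def]
  congr 1
  funext k
  rw [border_row_y w h (((k + 1 : Nat)):Int) 0 (by omega)]
  have e : ((((k + 1 : Nat):Int)) == (0:Int)) = false := by
    rw [beq_eq_false_iff_ne]; intro hc; omega
  simp only [e, Bool.true_and, Bool.false_and, Bool.not_false, Bool.not_not, Bool.and_true]

theorem interior_shifted (w h : Int) (l : List Int) :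
    pvInterior w h ((List.range l.length).map (fun k : Nat => ((0:Int), ((k + 1 : Nat):Int), l.getD k 0))) = [] := by
  simp only [pvInterior, List.filterMap_map, Function.comp_def]
  have e : ∀ k : Nat, pvBorderB w h ((k:Int) + 1) 0 = true :=
    fun k => border_row_y w h _ 0 (by omega)
  simp [e]

-- ----- the row loop of B computes pass1 + the interior pixels -----
theorem tvAltGo_spec (w h b lo hi : Int) (hw : 0 ≤ w)
    (hlo : lo = max 3 (w - 3)) (hhi : hi = max 3 w) :
    ∀ (rs : List (List Int)) (y : Int) (acc : List Int), 1 ≤ y → y + rs.length = h →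
    tvAltGo h b lo hi y acc rs =
      (if pvPass1 w h b (pvPixelsFrom y rs) then some (acc ++ pvInterior w h (pvPixelsFrom y rs)) else none) := by
  have hlo0 : 0 ≤ lo := by rw [hlo]; have := le_max_left (3:Int) (w - 3); omega
  have hhi0 : 0 ≤ hi := by rw [hhi]; have := le_max_left (3:Int) w; omega
  have hloN : ((lo.toNat : Nat) : Int) = max 3 (w - 3) := by rw [Int.toNat_of_nonneg hlo0]; exact hlo
  have hhiN : ((hi.toNat : Nat) : Int) = max 3 w := by rw [Int.toNat_of_nonneg hhi0]; exact hhi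
  intro rs
  induction rs with
  | nil => intro y acc hy hlen; simp [tvAltGo, pvPixelsFrom, pvPass1, pvInterior]
  | cons row rest ih =>
    intro y acc hy1 hlen
    have hyh : y < h := by
      simp only [List.length_cons] at hlen
      have : (0:Int) ≤ (rest.length : Int) := by positivity
      omega
    have hlen' : (y + 1) + rest.length = h := by
      simp only [List.length_cons] at hlen
      push_cast at hlen ⊢
      omega
    simp only [tvAltGo, pvPixelsFrom]
    rw [pass1_append, interior_append]
    by_cases hbr : y < 3 ∨ h - 3 ≤ y
    · have hcond : (decide (y < 3) || decide (h - 3 ≤ y)) = true := by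
        simp only [← Bool.decide_or, decide_eq_true_eq]; exact hbr
      rw [hcond, anynot, pass1_row_border w h b y row hy1 hyh hbr,
        interior_row_border w h y row hyh hbr]
      cases hall : row.all (· == b)
      · simp
      · simp only [Bool.not_true, Bool.false_eq_true, if_false, if_pos rfl, Bool.true_and,
          List.nil_append]
        exact ih (y + 1) acc (by omega) hlen'
    · have hcond : (decide (y < 3) || decide (h - 3 ≤ y)) = false := by
        simp only [← Bool.decide_or, decide_eq_false_iff_not]; exact hbr
      have hy3 : 3 ≤ y := by omega
      have hyh3 : y < h - 3 := by omega
      rw [hcond]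
      simp only [Bool.false_eq_true, if_false]
      rw [PySem.List.slice_to row (by omega : (0:Int) ≤ 3),
        PySem.List.slice_toNat row hlo0 hhi0,
        PySem.List.slice_toNat row (by omega : (0:Int) ≤ 3) hlo0,
        PySem.List.slice_from row hhi0,
        anynot,
        pass1_row_mid w h b y row hy3 hyh3 lo.toNat hi.toNat hloN hhiN,
        interior_row_mid w h y row hy3 hyh3 lo.toNat hi.toNat hloN hhiN]
      have e3 : ((3:Int)).toNat = 3 := rfl
      rw [e3]
      cases hall : (row.take 3 ++ (row.drop lo.toNat).take (hi.toNat - lo.toNat)).all (· == b)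
      · simp
      · rw [ih (y + 1) (acc ++ ((row.drop 3).take (lo.toNat - 3) ++ row.drop hi.toNat)) (by omega) hlen']
        simp [List.append_assoc]

-- the pixel list of a grid with non-empty first row: (0,0) first, then pixels with x ≥ 1 or y ≥ 1
theorem pixels_cons (v0 : Int) (r0' : List Int) (rs : List (List Int)) :
    pvPixels ((v0 :: r0') :: rs) =
      ((0 : Int), (0 : Int), v0) ::
        (((List.range r0'.length).map
            (fun k : Nat => ((0 : Int), ((k + 1 : Nat) : Int), r0'.getD k 0))) ++ pvPixelsFrom 1 rs) := by
  simp only [pvPixels, pvPixelsFrom, pvRowPix, List.length_cons, List.range_succ_eq_map,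
    List.map_cons, List.map_map, List.cons_append]
  norm_num [Function.comp_def]

theorem filter_len_count (c : Int) (l : List Int) :
    ((l.filter (· == c)).length : Int) = (l.count c : Int) := by
  simp [List.count_eq_countP, List.countP_eq_length_filter]

-- ===== VERDICT (by name: the statement is the Claim_ definition above) =====
theorem tv_spec : Claim_equal_tv := by
  intro arr cmd _ hpre
  obtain ⟨hne, hrow⟩ := hpre
  obtain ⟨r0, rs, rfl⟩ : ∃ r0 rs, arr = r0 :: rs := by
    cases arr with
    | nil => exact absurd rfl hne
    | cons a b => exact ⟨a, b, rfl⟩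
  obtain ⟨v0, r0', rfl⟩ : ∃ v0 r0', r0 = v0 :: r0' := by
    cases r0 with
    | nil => simp at hrow
    | cons a b => exact ⟨a, b, rfl⟩
  show tv _ cmd = tv_alt _ cmd
  have hpix := pixels_cons v0 r0' rs
  set R := (((List.range r0'.length).map
      (fun k : Nat => ((0 : Int), ((k + 1 : Nat) : Int), r0'.getD k 0))) ++ pvPixelsFrom 1 rs) with hR
  have h00R : ∀ p ∈ R, ¬(p.1 = 0 ∧ p.2.1 = 0) := by
    intro p hp
    rcases List.mem_append.mp hp with hp | hp
    · obtain ⟨k, -, rfl⟩ := List.mem_map.mp hp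
      intro hq
      have := hq.2
      simp at this
      omega
    · have := pixels_from_pos 1 le_rfl rs p hp
      intro hq; omega
  have hnnR : ∀ p ∈ R, 0 ≤ p.1 ∧ 0 ≤ p.2.1 := by
    intro p hp
    rcases List.mem_append.mp hp with hp | hp
    · obtain ⟨k, -, rfl⟩ := List.mem_map.mp hp
      exact ⟨le_refl 0, by positivity⟩
    · exact pixels_nonneg 1 (by omega) rs p hp
  have hbA : pvBorderA ((((v0 :: r0') :: rs).headD []).length : Int) (((v0 :: r0') :: rs).length : Int) 0 0 = true := by
    simp [pvBorderA]
  rw [tv, hpix]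
  simp only [tvLoop, hbA, if_pos rfl, ite_true, and_self]
  rw [tvLoop_start _ _ _ R none 0 h00R hnnR, hR, pass1_append, pass1_shifted, interior_append,
    interior_shifted, List.nil_append]
  -- B side
  rw [tv_alt]
  simp only [List.headD_cons, List.getD_cons_zero]
  simp only [tvAltGo]
  have hc0 : (decide ((0:Int) < 3) || decide (((((v0 :: r0') :: rs).length : Nat) : Int) - 3 ≤ 0)) = true := by
    rw [Bool.or_eq_true]; left; rw [decide_eq_true_eq]; omega
  rw [hc0]
  simp only [if_true, List.any_cons, beq_self_eq_true, Bool.not_true, Bool.false_or]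
  simp only [zero_add]
  rw [tvAltGo_spec (((v0 :: r0').length : Nat) : Int) ((((v0 :: r0') :: rs).length : Nat) : Int)
        v0 _ _ (by positivity) rfl rfl rs 1 [] (by omega) (by simp; omega)]
  rw [anynot]
  cases hall : r0'.all (fun v => v == v0)
  · simp
  · simp only [Bool.not_true, Bool.false_eq_true, if_false, Bool.true_and, List.nil_append]
    cases hp : pvPass1 (((v0 :: r0').length : Nat) : Int) ((((v0 :: r0') :: rs).length : Nat) : Int)
        v0 (pvPixelsFrom 1 rs)
    · simp
    · simp only [if_true]
      cases hI : pvInterior (((v0 :: r0').length : Nat) : Int)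
          ((((v0 :: r0') :: rs).length : Nat) : Int) (pvPixelsFrom 1 rs)
      · simp
      · rename_i c rest
        simp [filter_len_count]
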